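-- pv_equiv track=rewrite | github.com/pypi-data/pypi-mirror-377 | packages/cosapp/cosapp-1.3.0-py3-none-any.whl/cosapp/utils/parsing.py | find_selector
-- ===== SOURCE A (Python) =====
-- def find_selector(expression: str) -> tuple[str, str]:
--     """Decompose a string expression into `basename` and `selector`,
--     where `selector` is a suitable mask expression for an array.
--
--     Parameters:
--     -----------
--     expression [str]: the expression to be parsed.
--
--     Returns:
--     --------
--     baseline, selector [str, str]
--     """
--     expression = expression.strip()
--     left_bracket, right_bracket = brackets = tuple("[]")
--     nl = nr = il = 0
--
--     basename, selector = expression, ""  # default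
--
--     if expression.endswith(right_bracket):
--         i = len(expression)
--         for char in reversed(expression):
--             i -= 1
--             if char == right_bracket:
--                 nr += 1
--             elif char == left_bracket:
--                 nl += 1
--                 if nl == nr:
--                     prev_char = expression[i - 1] if i > 0 else None
--                     if prev_char not in brackets:
--                         il = i
--                         break
--
--     elif expression.endswith(left_bracket):
--         nl, nr = 1, 0
--
--     balanced = (nl == nr)
--     if not balanced:
--         raise ValueError(f"Bracket mismatch in {expression!s}")
--     if il > 0 or expression.startswith(left_bracket):
--         basename = expression[:il]
--         selector = expression[il:]
--
--     return basename, selector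
-- ===== SOURCE B (Python) =====
-- def find_selector(expression: str) -> tuple[str, str]:
--     """Decompose a string expression into `basename` and `selector`."""
--     expr = expression.strip()
--     if expr.endswith('['):
--         raise ValueError(f"Bracket mismatch in {expr!s}")
--     if not expr.endswith(']'):
--         if expr.startswith('['):
--             return "", expr
--         return expr, ""
--     # split index = largest i with expr[i]=='[', the suffix expr[i:] having
--     # equally many '[' and ']' (i.e. prefix diff == total diff T), and the
--     # preceding character not a bracket; one forward pass tracks the prefix diff.
--     T = expr.count(']') - expr.count('[')
--     d = 0
--     cut = None
--     for i, ch in enumerate(expr):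
--         if ch == '[':
--             if d == T and (i == 0 or expr[i - 1] not in '[]'):
--                 cut = i
--             d -= 1
--         elif ch == ']':
--             d += 1
--     if cut is not None:
--         return expr[:cut], expr[cut:]
--     if T != 0:
--         raise ValueError(f"Bracket mismatch in {expr!s}")
--     if expr.startswith('['):
--         return "", expr
--     return expr, ""
-- ===== Notes on version B (the rewrite author's own statement) =====
-- stated objective: alternative
-- what changed: A scans the string right-to-left with two bracket counters and breaks at the first balanced '[' ; B makes one left-to-right pass that tracks the running prefix bracket difference against the closed-form total difference T and keeps the last qualifying '[' position, so no reversed traversal or break is needed.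
import Mathlib
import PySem

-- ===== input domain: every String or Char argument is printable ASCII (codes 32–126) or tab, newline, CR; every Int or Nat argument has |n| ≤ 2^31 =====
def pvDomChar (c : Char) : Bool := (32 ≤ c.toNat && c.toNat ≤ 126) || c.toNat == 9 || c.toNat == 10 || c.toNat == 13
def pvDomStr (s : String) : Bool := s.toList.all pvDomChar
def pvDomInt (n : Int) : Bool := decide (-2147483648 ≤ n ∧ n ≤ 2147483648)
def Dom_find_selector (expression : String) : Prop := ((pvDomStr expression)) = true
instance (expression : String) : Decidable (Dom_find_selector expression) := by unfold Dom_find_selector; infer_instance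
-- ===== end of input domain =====

-- B replaces A's right-to-left counting scan with a single forward pass that uses the
-- closed-form total bracket difference T to recognise split points (objective: alternative).
-- On inputs where the Python raises ValueError (excluded by Pre_) both ports return ("","").

-- ===== PORT A =====
-- the reversed 'for char in reversed(expression)' loop of A: i counts down, nl/nr count
-- brackets; returns (some i) on break, (none) when the loop runs out, plus final nl, nr
def findA_loop (l : List Char) : Nat → Int → Int → Option Nat × Int × Int
  | 0, nl, nr => (none, nl, nr)
  | i + 1, nl, nr =>
    if l.getD i ' ' = ']' then findA_loop l i nl (nr + 1)
    else if l.getD i ' ' = '[' then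
      if nl + 1 = nr then
        -- prev_char = expression[i-1] if i > 0 else None; break if prev_char not in brackets
        if i == 0 || (l.getD (i - 1) ' ' != '[' && l.getD (i - 1) ' ' != ']') then
          (some i, nl + 1, nr)
        else findA_loop l i (nl + 1) nr
      else findA_loop l i (nl + 1) nr
    else findA_loop l i nl nr

def find_selector (expression : String) : String × String :=
  let expr := PySem.Str.strip expression
  let l := expr.toList
  let r :=
    if PySem.Str.endswith expr "]" then
      match findA_loop l l.length 0 0 with
      | (some j, nl, nr) => (j, nl, nr)
      | (none, nl, nr) => (0, nl, nr)
    else if PySem.Str.endswith expr "[" then (0, (1 : Int), (0 : Int))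
    else (0, (0 : Int), (0 : Int))
  if r.2.1 ≠ r.2.2 then ("", "")  -- ValueError("Bracket mismatch …") in Python: outside Pre_
  else if r.1 > 0 || PySem.Str.startswith expr "[" then
    (String.ofList (PySem.List.slice l none (some (r.1 : Int))),
     String.ofList (PySem.List.slice l (some (r.1 : Int)) none))
  else (expr, "")

-- ===== PORT B =====
-- Source B's single forward pass: d is the running prefix difference, acc the last split point
def findB_loop (l : List Char) : List Char → Nat → Int → Int → Option Nat → Option Nat
  | [], _, _, _, acc => acc
  | c :: rest, i, d, T, acc =>
    if c = '[' then
      findB_loop l rest (i + 1) (d - 1) T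
        (if d == T && (i == 0 || (l.getD (i - 1) ' ' != '[' && l.getD (i - 1) ' ' != ']'))
         then some i else acc)
    else if c = ']' then findB_loop l rest (i + 1) (d + 1) T acc
    else findB_loop l rest (i + 1) d T acc

def find_selector_alt (expression : String) : String × String :=
  let expr := PySem.Str.strip expression
  let l := expr.toList
  if PySem.Str.endswith expr "[" then ("", "")  -- raise ValueError: outside Pre_
  else if !PySem.Str.endswith expr "]" then
    if PySem.Str.startswith expr "[" then ("", expr) else (expr, "")
  else
    match findB_loop l l 0 0 ((PySem.Str.count expr "]" : Int) - (PySem.Str.count expr "[" : Int)) none with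
    | some i =>
        (String.ofList (PySem.List.slice l none (some (i : Int))),
         String.ofList (PySem.List.slice l (some (i : Int)) none))
    | none =>
        if (PySem.Str.count expr "]" : Int) - (PySem.Str.count expr "[" : Int) ≠ 0 then ("", "")  -- raise ValueError: outside Pre_
        else if PySem.Str.startswith expr "[" then ("", expr)
        else (expr, "")

-- ===== PRECONDITION & SPEC =====
-- pvQ l i: position i of the stripped string is a '[' whose suffix has balanced bracket
-- counts and whose predecessor is not a bracket — exactly where A's loop can break.
def pvQ (l : List Char) (i : Nat) : Bool :=
  l.getD i ' ' == '[' &&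
  ((l.drop i).count ']' == (l.drop i).count '[') &&
  (i == 0 || (l.getD (i - 1) ' ' != '[' && l.getD (i - 1) ' ' != ']'))

-- Pre_ excludes exactly the inputs on which A raises ValueError: a stripped expression
-- ending in '[', or ending in ']' with no break position and unequal bracket counts.
def Pre_find_selector (expression : String) : Prop :=
  PySem.Str.endswith (PySem.Str.strip expression) "[" = false ∧
  (PySem.Str.endswith (PySem.Str.strip expression) "]" = true →
    (∃ i < (PySem.Str.strip expression).toList.length, pvQ (PySem.Str.strip expression).toList i = true) ∨
    (PySem.Str.strip expression).toList.count '[' = (PySem.Str.strip expression).toList.count ']')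

instance (expression : String) : Decidable (Pre_find_selector expression) := by
  unfold Pre_find_selector; infer_instance

def pvWitness_find_selector : String := "x[0]"

def Spec_find_selector (expression : String) (out : String × String) : Prop := out = find_selector_alt expression
instance (expression : String) (out : String × String) : Decidable (Spec_find_selector expression out) := by unfold Spec_find_selector; infer_instance

-- ===== CLAIM (what is proved, stated in full; the proofs are below) =====
def Claim_equal_find_selector : Prop := ∀ (expression : String), Dom_find_selector expression → Pre_find_selector expression → Spec_find_selector expression (find_selector expression)

-- ===== LEMMAS AND PROOFS =====

-- Chars.count with a one-character pattern is List.count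
lemma count_go_singleton (c : Char) : ∀ (l : List Char) (fuel acc : Nat), l.length ≤ fuel →
    PySem.Chars.count.go [c] fuel l acc = acc + l.count c := by
  intro l
  induction l with
  | nil => intro fuel acc h; cases fuel <;> simp [PySem.Chars.count.go]
  | cons hd tl ih =>
    intro fuel acc h
    cases fuel with
    | zero => simp at h
    | succ f =>
      have hstep : PySem.Chars.count.go [c] (f + 1) (hd :: tl) acc =
          if c == hd then PySem.Chars.count.go [c] f tl (acc + 1)
          else PySem.Chars.count.go [c] f tl acc := by
        simp [PySem.Chars.count.go, List.isPrefixOf]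
      have hlen : tl.length ≤ f := by simpa using h
      by_cases hc : c = hd
      · subst hc
        rw [hstep, if_pos (by simp), ih f (acc + 1) hlen, List.count_cons, if_pos (by simp)]
        omega
      · rw [hstep, if_neg (by simpa using hc), ih f acc hlen, List.count_cons,
            if_neg (by simp only [beq_iff_eq]; exact fun h' => hc h'.symm)]
        omega

lemma count_singleton (l : List Char) (c : Char) :
    PySem.Chars.count l [c] = l.count c := by
  have := count_go_singleton c l l.length 0 le_rfl
  simpa [PySem.Chars.count] using this

lemma endswith_singleton (l : List Char) (c : Char) :
    PySem.Chars.endswith l [c] = (l.getLast? == some c) := by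
  rw [show l.getLast? = l.reverse.head? by simp]
  cases h : l.reverse with
  | nil => simp [PySem.Chars.endswith, List.isSuffixOf, h]
  | cons hd tl => simp [PySem.Chars.endswith, List.isSuffixOf, h, List.isPrefixOf, eq_comm]

lemma startswith_singleton (l : List Char) (c : Char) :
    PySem.Chars.startswith l [c] = (l.head? == some c) := by
  cases l with
  | nil => simp [PySem.Chars.startswith, List.isPrefixOf]
  | cons hd tl => simp [PySem.Chars.startswith, List.isPrefixOf, eq_comm]

lemma bool_ext {a b : Bool} (h : a = true ↔ b = true) : a = b := by
  cases a <;> cases b <;> simp_all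

-- A's reversed loop, started at index i with the bracket counts of the suffix l.drop i,
-- breaks at the greatest break position below i, or ends with the full counts.
lemma loopA_spec (l : List Char) : ∀ i, i ≤ l.length →
    findA_loop l i ((l.drop i).count '[' : Int) ((l.drop i).count ']' : Int) =
      match (List.range i).reverse.find? (pvQ l) with
      | some j => (some j, ((l.drop j).count '[' : Int), ((l.drop j).count ']' : Int))
      | none => (none, (l.count '[' : Int), (l.count ']' : Int)) := by
  intro i
  induction i with
  | zero => intro _; simp [findA_loop]
  | succ i ih =>
    intro h
    have hi : i < l.length := h
    have hdrop : l.drop i = l[i] :: l.drop (i + 1) := List.drop_eq_getElem_cons hi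
    have hgd : l.getD i ' ' = l[i] := List.getD_eq_getElem l ' ' hi
    have hrev : (List.range (i + 1)).reverse = i :: (List.range i).reverse := by
      rw [List.range_succ]; simp
    rw [hrev, findA_loop, hgd]
    by_cases hc : l[i] = ']'
    · have hcl : ((l.drop (i + 1)).count '[' : Int) = ((l.drop i).count '[' : Int) := by
        rw [hdrop, List.count_cons]; simp [hc]
      have hcr : ((l.drop (i + 1)).count ']' : Int) + 1 = ((l.drop i).count ']' : Int) := by
        rw [hdrop, List.count_cons]; simp [hc]
      have hq : ¬ pvQ l i = true := by
        simp only [pvQ]; rw [hgd, hc]; simp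
      rw [if_pos hc, hcl, hcr, List.find?_cons_of_neg hq]
      exact ih (le_of_lt hi)
    · by_cases hb : l[i] = '['
      · have hcl : ((l.drop (i + 1)).count '[' : Int) + 1 = ((l.drop i).count '[' : Int) := by
          rw [hdrop, List.count_cons]; simp [hb]
        have hcr : ((l.drop (i + 1)).count ']' : Int) = ((l.drop i).count ']' : Int) := by
          rw [hdrop, List.count_cons]; simp [hb]
        have hcond : (((l.drop (i + 1)).count '[' : Int) + 1 = ((l.drop (i + 1)).count ']' : Int)) ↔
            (((l.drop i).count ']' == (l.drop i).count '[') = true) := by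
          rw [beq_iff_eq]
          have h1 : (l.drop i).count '[' = (l.drop (i + 1)).count '[' + 1 := by
            rw [hdrop, List.count_cons]; simp [hb]
          have h2 : (l.drop i).count ']' = (l.drop (i + 1)).count ']' := by
            rw [hdrop, List.count_cons]; simp [hb]
          omega
        rw [if_neg hc, if_pos hb]
        by_cases heq : ((l.drop (i + 1)).count '[' : Int) + 1 = ((l.drop (i + 1)).count ']' : Int)
        · rw [if_pos heq]
          by_cases hpo : (i == 0 || (l.getD (i - 1) ' ' != '[' && l.getD (i - 1) ' ' != ']')) = true
          · have hq : pvQ l i = true := by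
              simp only [pvQ]; rw [hgd, hb]
              simp only [BEq.rfl, Bool.true_and, Bool.and_eq_true]
              exact ⟨hcond.mp heq, hpo⟩
            rw [if_pos hpo, List.find?_cons_of_pos hq, hcl, hcr]
          · have hpo' : (i == 0 || (l.getD (i - 1) ' ' != '[' && l.getD (i - 1) ' ' != ']')) = false :=
              Bool.eq_false_iff.mpr hpo
            have hq : ¬ pvQ l i = true := by
              simp only [pvQ, hpo', Bool.and_false, Bool.false_eq_true, not_false_eq_true]
            rw [if_neg hpo, hcl, hcr, List.find?_cons_of_neg hq]
            exact ih (le_of_lt hi)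
        · have h2 : ((l.drop i).count ']' == (l.drop i).count '[') = false :=
            Bool.eq_false_iff.mpr fun hcj => heq (hcond.mpr hcj)
          have hq : ¬ pvQ l i = true := by
            simp only [pvQ, h2, Bool.false_and, Bool.and_false, Bool.false_eq_true, not_false_eq_true]
          rw [if_neg heq, hcl, hcr, List.find?_cons_of_neg hq]
          exact ih (le_of_lt hi)
      · have hcl : ((l.drop (i + 1)).count '[' : Int) = ((l.drop i).count '[' : Int) := by
          rw [hdrop, List.count_cons]; simp [hb]
        have hcr : ((l.drop (i + 1)).count ']' : Int) = ((l.drop i).count ']' : Int) := by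
          rw [hdrop, List.count_cons]; simp [hc]
        have hq : ¬ pvQ l i = true := by
          simp only [pvQ]; rw [hgd]; simp [hb]
        rw [if_neg hc, if_neg hb, hcl, hcr, List.find?_cons_of_neg hq]
        exact ih (le_of_lt hi)

-- B's forward loop, started at index i with the prefix difference of l.take i, returns
-- the greatest break position in [i, length), else the accumulator.
lemma loopB_spec (l : List Char) : ∀ k i acc, i + k = l.length →
    findB_loop l (l.drop i) i
        (((l.take i).count ']' : Int) - ((l.take i).count '[' : Int))
        ((l.count ']' : Int) - (l.count '[' : Int)) acc =
      ((List.range' i k).reverse.find? (pvQ l)).or acc := by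
  intro k
  induction k with
  | zero =>
    intro i acc h
    have : i = l.length := by omega
    subst this
    simp [findB_loop, List.drop_length]
  | succ k ih =>
    intro i acc h
    have hi : i < l.length := by omega
    have hdrop : l.drop i = l[i] :: l.drop (i + 1) := List.drop_eq_getElem_cons hi
    have hgd : l.getD i ' ' = l[i] := List.getD_eq_getElem l ' ' hi
    have htake : l.take (i + 1) = l.take i ++ [l[i]] := by
      rw [List.take_add_one]; simp [List.getElem?_eq_getElem hi]
    have hsplit : ∀ c : Char, l.count c = (l.take i).count c + (l.drop i).count c := by
      intro c
      conv_lhs => rw [← List.take_append_drop i l]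
      rw [List.count_append]
    have hrev : (List.range' i (k + 1)).reverse =
        (List.range' (i + 1) k).reverse ++ [i] := by
      rw [List.range'_succ]; simp
    rw [hrev, List.find?_append, hdrop, findB_loop]
    by_cases hb : l[i] = '['
    · have hd1 : (((l.take i).count ']' : Int) - ((l.take i).count '[' : Int)) - 1 =
          ((l.take (i + 1)).count ']' : Int) - ((l.take (i + 1)).count '[' : Int) := by
        rw [htake, List.count_append, List.count_append, List.count_cons, List.count_cons]
        simp [hb]
        ring
      have hcond : ((((l.take i).count ']' : Int) - ((l.take i).count '[' : Int)) ==
            ((l.count ']' : Int) - (l.count '[' : Int))) =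
          ((l.drop i).count ']' == (l.drop i).count '[') := by
        apply bool_ext
        rw [beq_iff_eq, beq_iff_eq]
        have h1 := hsplit ']'
        have h2 := hsplit '['
        omega
      have hpv : pvQ l i =
          (((l.drop i).count ']' == (l.drop i).count '[') &&
           (i == 0 || (l.getD (i - 1) ' ' != '[' && l.getD (i - 1) ' ' != ']'))) := by
        simp only [pvQ]; rw [hgd, hb]; simp
      rw [if_pos hb, hcond, ← hpv, hd1, ih (i + 1) _ (by omega)]
      cases hf : (List.range' (i + 1) k).reverse.find? (pvQ l) with
      | some j => simp
      | none =>
        simp only [Option.none_or, List.find?_singleton]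
        cases hq : pvQ l i
        · simp
        · simp
    · by_cases hc : l[i] = ']'
      · have hd1 : (((l.take i).count ']' : Int) - ((l.take i).count '[' : Int)) + 1 =
            ((l.take (i + 1)).count ']' : Int) - ((l.take (i + 1)).count '[' : Int) := by
          rw [htake, List.count_append, List.count_append, List.count_cons, List.count_cons]
          simp [hc]
          ring
        have hq : pvQ l i = false := by
          simp only [pvQ]; rw [hgd, hc]; simp
        rw [if_neg hb, if_pos hc, hd1, ih (i + 1) _ (by omega)]
        cases hf : (List.range' (i + 1) k).reverse.find? (pvQ l) with
        | some j => simp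
        | none => simp [hq]
      · have hd1 : ((l.take (i + 1)).count ']' : Int) - ((l.take (i + 1)).count '[' : Int) =
            ((l.take i).count ']' : Int) - ((l.take i).count '[' : Int) := by
          rw [htake, List.count_append, List.count_append, List.count_cons, List.count_cons]
          simp [hc, hb]
        have hq : pvQ l i = false := by
          simp only [pvQ]; rw [hgd]; simp [hb]
        rw [if_neg hb, if_neg hc, ← hd1, ih (i + 1) _ (by omega)]
        cases hf : (List.range' (i + 1) k).reverse.find? (pvQ l) with
        | some j => simp
        | none => simp [hq]

-- bridges from the String wrappers to list facts on the stripped string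
lemma endswith_rb (s : String) :
    PySem.Str.endswith s "]" = (s.toList.getLast? == some ']') := by
  rw [PySem.Str.endswith_eq, show ("]" : String).toList = [']'] from rfl, endswith_singleton]

lemma endswith_lb (s : String) :
    PySem.Str.endswith s "[" = (s.toList.getLast? == some '[') := by
  rw [PySem.Str.endswith_eq, show ("[" : String).toList = ['['] from rfl, endswith_singleton]

lemma startswith_lb (s : String) :
    PySem.Str.startswith s "[" = (s.toList.head? == some '[') := by
  rw [PySem.Str.startswith_eq, show ("[" : String).toList = ['['] from rfl, startswith_singleton]

lemma count_rb (s : String) : PySem.Str.count s "]" = s.toList.count ']' := by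
  rw [PySem.Str.count_eq, show ("]" : String).toList = [']'] from rfl, count_singleton]

lemma count_lb (s : String) : PySem.Str.count s "[" = s.toList.count '[' := by
  rw [PySem.Str.count_eq, show ("[" : String).toList = ['['] from rfl, count_singleton]

lemma head_getD_lb (l : List Char) (h : l[0]?.getD ' ' = '[') : l.head? = some '[' := by
  cases l with
  | nil => simp at h
  | cons hd tl => simpa using h

lemma slice_zero_pair (l : List Char) :
    (String.ofList (PySem.List.slice l none (some (0 : Int))),
     String.ofList (PySem.List.slice l (some (0 : Int)) none)) =
    ("", String.ofList l) := by
  rw [show (0 : Int) = ((0 : Nat) : Int) from by simp,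
    PySem.List.slice_to_natCast, PySem.List.slice_from_natCast]
  simp

-- ===== VERDICT (by name: the statement is the Claim_ definition above) =====
theorem find_selector_spec : Claim_equal_find_selector := by
  intro expression _ hpre
  unfold Spec_find_selector
  obtain ⟨hpre1, hpre2⟩ := hpre
  simp only [find_selector, find_selector_alt]
  set s := PySem.Str.strip expression with hs
  set l := s.toList with hl
  have hofl : String.ofList l = s := by rw [hl]; simp
  clear_value l s
  by_cases h1 : l.getLast? = some ']'
  · -- stripped expression ends with ']'
    have he1 : PySem.Str.endswith s "]" = true := by rw [endswith_rb, ← hl, h1]; simp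
    have he2 : PySem.Str.endswith s "[" = false := by rw [endswith_lb, ← hl, h1]; simp
    have hA := loopA_spec l l.length le_rfl
    rw [List.drop_length] at hA
    simp only [List.count_nil, Nat.cast_zero] at hA
    have hB := loopB_spec l l.length 0 none (by omega)
    rw [List.drop_zero, List.take_zero] at hB
    simp only [List.count_nil, Nat.cast_zero, sub_zero, ← List.range_eq_range',
      Option.or_none] at hB
    rw [he1, if_pos (show (true : Bool) = true from rfl), he2,
      if_neg (show ¬((false : Bool) = true) by simp)]
    simp only [Bool.not_true]
    rw [if_neg (show ¬((false : Bool) = true) by simp), count_rb, count_lb, ← hl]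
    cases hF : (List.range l.length).reverse.find? (pvQ l) with
    | some j =>
      have hq := List.find?_some hF
      simp only [pvQ, Bool.and_eq_true, beq_iff_eq] at hq
      obtain ⟨⟨hq1, hq2⟩, hq3⟩ := hq
      have hA' : findA_loop l l.length 0 0 =
          (some j, ((l.drop j).count '[' : Int), ((l.drop j).count ']' : Int)) := by
        rw [hA, hF]
      have hB' : findB_loop l l 0 0 ((l.count ']' : Int) - (l.count '[' : Int)) none = some j := by
        rw [hB, hF]
      simp only [hA', hB']
      rw [if_neg (show ¬(((l.drop j).count '[' : Int) ≠ ((l.drop j).count ']' : Int)) by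
        simp [hq2])]
      by_cases hj : j > 0
      · rw [if_pos (by simp [hj])]
      · have hj0 : j = 0 := by omega
        subst hj0
        have hhd : l.head? = some '[' := head_getD_lb l hq1
        rw [if_pos (by rw [startswith_lb, ← hl, hhd]; simp)]
    | none =>
      have hA' : findA_loop l l.length 0 0 = (none, (l.count '[' : Int), (l.count ']' : Int)) := by
        rw [hA, hF]
      have hB' : findB_loop l l 0 0 ((l.count ']' : Int) - (l.count '[' : Int)) none = none := by
        rw [hB, hF]
      simp only [hA', hB']
      by_cases heqc : (l.count '[' : Int) = (l.count ']' : Int)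
      · rw [if_neg (show ¬((l.count '[' : Int) ≠ (l.count ']' : Int)) by simp [heqc]),
          if_neg (show ¬(((l.count ']' : Int) - (l.count '[' : Int)) ≠ 0) by omega)]
        by_cases hsw : PySem.Str.startswith s "[" = true
        · rw [hsw]
          simp only [Bool.or_true, slice_zero_pair, hofl]
        · rw [Bool.eq_false_iff.mpr hsw]
          simp
      · rw [if_pos (show ((l.count '[' : Int) ≠ (l.count ']' : Int)) from heqc),
          if_pos (show (((l.count ']' : Int) - (l.count '[' : Int)) ≠ 0) by omega)]
  · -- stripped expression does not end with ']'
    have he1 : PySem.Str.endswith s "]" = false := by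
      rw [endswith_rb, ← hl]; simpa using h1
    by_cases h2 : l.getLast? = some '['
    · -- would end with '[': A raises; excluded by Pre_
      exfalso
      rw [endswith_lb, ← hl] at hpre1
      simp [h2] at hpre1
    · have he2 : PySem.Str.endswith s "[" = false := by
        rw [endswith_lb, ← hl]; simpa using h2
      rw [he1, if_neg (show ¬((false : Bool) = true) by simp), he2,
        if_neg (show ¬((false : Bool) = true) by simp)]
      simp only [Bool.not_false]
      rw [if_neg (show ¬((0 : Int) ≠ (0 : Int)) by simp),
        if_neg (show ¬((false : Bool) = true) by simp), if_pos (show True from trivial)]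
      by_cases hsw : PySem.Str.startswith s "[" = true
      · rw [hsw]
        simp only [Bool.or_true, slice_zero_pair, hofl]
      · rw [Bool.eq_false_iff.mpr hsw]
        simp
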